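-- pv_equiv track=rewrite | github.com/cgbts88/MisVue | apps/utils/util.py | format_user_name
-- ===== SOURCE A (Python) =====
-- def format_user_name(name):
-- 	"""
-- 	格式化英文姓名
-- 	将带有空格的英文名称转了全小写不带空格
-- 	"""
--
-- 	name = name.strip()  # 去除两边空格
-- 	username = ""
-- 	en_name = ""
-- 	for i, item in enumerate(name):
-- 		if i == 0:
-- 			username = item.lower()
-- 			en_name = item
-- 		elif item.isspace():
-- 			en_name += " "
-- 		else:
-- 			username += item.lower()
-- 			en_name += item
-- 	return username, en_name
-- ===== SOURCE B (Python) =====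
-- def format_user_name(name):
--     s = name.strip()
--     # segment s into maximal runs of same character class (whitespace / non-whitespace)
--     parts = []
--     i, n = 0, len(s)
--     while i < n:
--         sp = s[i].isspace()
--         j = i + 1
--         while j < n and s[j].isspace() == sp:
--             j += 1
--         parts.append(s[i:j])
--         i = j
--     en_name = ''.join(' ' * len(p) if p[0].isspace() else p for p in parts)
--     username = ''.join(p for p in parts if not p[0].isspace()).lower()
--     return username, en_name
-- ===== Notes on version B (the rewrite author's own statement) =====
-- stated objective: alternative
-- what changed: A accumulates both result strings character by character in one indexed loop with a first-iteration branch; B first segments the stripped name into a list of maximal whitespace/non-whitespace runs (a different intermediate data structure) and then assembles en_name by replacing each whitespace run with a same-length space block and username by joining and lowercasing the non-whitespace runs.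
import Mathlib
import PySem

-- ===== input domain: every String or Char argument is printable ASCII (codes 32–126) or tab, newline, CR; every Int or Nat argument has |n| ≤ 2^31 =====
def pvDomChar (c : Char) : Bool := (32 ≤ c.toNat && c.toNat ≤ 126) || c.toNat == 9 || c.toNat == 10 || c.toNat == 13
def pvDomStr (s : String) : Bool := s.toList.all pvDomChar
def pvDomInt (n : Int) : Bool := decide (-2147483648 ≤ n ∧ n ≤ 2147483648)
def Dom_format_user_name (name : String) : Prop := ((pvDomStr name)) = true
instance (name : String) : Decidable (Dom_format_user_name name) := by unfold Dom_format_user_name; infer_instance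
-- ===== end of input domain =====

-- B segments the stripped name into maximal whitespace/non-whitespace runs and assembles both outputs from that run list (different data structure), instead of A's indexed per-character parallel loop: alternative decomposition, same values.


-- ===== PORT A =====
-- the loop body of A (state = (username, en_name) as char lists; p = (i, item) from enumerate)
def fmtStep (st : List Char × List Char) (p : Int × Char) : List Char × List Char :=
  if p.1 == 0 then ([PySem.Chars.lowerChar p.2], [p.2])
  else if PySem.Chars.isspace p.2 then (st.1, st.2 ++ [' '])
  else (st.1 ++ [PySem.Chars.lowerChar p.2], st.2 ++ [p.2])

def format_user_name (name : String) : String × String :=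
  let s := (PySem.Str.strip name).toList
  let r := (PySem.List.enumerate s 0).foldl fmtStep ([], [])
  (String.ofList r.1, String.ofList r.2)

-- ===== PORT B =====
-- B's outer while loop: each step takes one maximal run of same whitespace-class characters
-- (the inner `while j < n and s[j].isspace() == sp: j += 1` followed by the slice s[i:j]
-- is exactly takeWhile, and advancing i to j is exactly dropWhile).
def pvParts : List Char → List (List Char)
  | [] => []
  | c :: t =>
    (c :: t.takeWhile (fun x => PySem.Chars.isspace x == PySem.Chars.isspace c)) ::
      pvParts (t.dropWhile (fun x => PySem.Chars.isspace x == PySem.Chars.isspace c))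
termination_by l => l.length
decreasing_by simpa using Nat.lt_succ_of_le (List.length_dropWhile_le ..)

-- p[0].isspace() (runs are nonempty by construction; [] is an unreachable default)
def partIsSpace (p : List Char) : Bool :=
  match p with
  | [] => false
  | c :: _ => PySem.Chars.isspace c

def format_user_name_alt (name : String) : String × String :=
  let parts := pvParts (PySem.Str.strip name).toList
  let en := (parts.map (fun p => if partIsSpace p then List.replicate p.length ' ' else p)).flatten
  let username := PySem.Chars.lower ((parts.filter (fun p => !partIsSpace p)).flatten)
  (String.ofList username, String.ofList en)

-- ===== PRECONDITION & SPEC =====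
def Spec_format_user_name (name : String) (out : String × String) : Prop := out = format_user_name_alt name
instance (name : String) (out : String × String) : Decidable (Spec_format_user_name name out) := by unfold Spec_format_user_name; infer_instance

-- ===== CLAIM (what is proved, stated in full; the proofs are below) =====
def Claim_equal_format_user_name : Prop := ∀ (name : String), Dom_format_user_name name → Spec_format_user_name name (format_user_name name)

-- ===== LEMMAS AND PROOFS =====

-- ' ' if c.isspace() else c  (proof-side characterisation of en_name's characters)
def toSpace (c : Char) : Char := if PySem.Chars.isspace c then ' ' else c

-- A's loop past the first index appends exactly the filter/map characterisation
theorem fmt_loopA (rest : List Char) : ∀ (k : Int) (u e : List Char), 1 ≤ k →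
    (PySem.List.enumerate rest k).foldl fmtStep (u, e) =
      (u ++ (rest.filter (fun c => !PySem.Chars.isspace c)).map PySem.Chars.lowerChar,
       e ++ rest.map toSpace) := by
  induction rest with
  | nil => intro k u e hk; simp [PySem.List.enumerate_nil]
  | cons c t ih =>
    intro k u e hk
    rw [PySem.List.enumerate_cons]
    have hk0 : (k == (0 : Int)) = false := by simp; omega
    by_cases hc : PySem.Chars.isspace c = true
    · simp only [List.foldl_cons, fmtStep, hk0, hc, if_pos]
      rw [ih (k+1) _ _ (by omega)]
      simp [toSpace, hc]
    · have hcb : PySem.Chars.isspace c = false := Bool.eq_false_iff.mpr hc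
      simp only [List.foldl_cons, fmtStep, hk0, if_false, hcb, Bool.false_eq_true]
      rw [ih (k+1) _ _ (by omega)]
      simp [toSpace, hcb]

-- the head of a stripped string is never whitespace
theorem fmt_strip_head (s : List Char) :
    ∀ c t, PySem.Chars.strip s = c :: t → PySem.Chars.isspace c = false := by
  intro c t h
  have hpre : PySem.Chars.strip s <+: PySem.Chars.lstrip s := by
    simp only [PySem.Chars.strip, PySem.Chars.rstrip]
    have := List.dropWhile_suffix (l := (PySem.Chars.lstrip s).reverse) (p := PySem.Chars.isspace)
    rcases this with ⟨pre, hpre⟩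
    exact ⟨pre.reverse, by rw [← List.reverse_append, hpre, List.reverse_reverse]⟩
  rcases hpre with ⟨suf, hsuf⟩
  rw [h] at hsuf
  have : (PySem.Chars.lstrip s).head? = some c := by rw [← hsuf]; simp
  have hd : (List.dropWhile PySem.Chars.isspace s).head? = some c := this
  have := List.head?_dropWhile_not (p := PySem.Chars.isspace) (l := s)
  rw [hd] at this
  simpa using this

-- B's en_name assembly over the run list is the per-character space map
theorem fmt_parts_en (l : List Char) :
    ((pvParts l).map (fun p => if partIsSpace p then List.replicate p.length ' ' else p)).flatten
      = l.map toSpace := by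
  induction l using pvParts.induct with
  | case1 => simp [pvParts]
  | case2 c t ih =>
    rw [pvParts]
    have hsplit := List.takeWhile_append_dropWhile
      (p := fun x => PySem.Chars.isspace x == PySem.Chars.isspace c) (l := t)
    have hmem : ∀ x ∈ t.takeWhile (fun x => PySem.Chars.isspace x == PySem.Chars.isspace c),
        PySem.Chars.isspace x = PySem.Chars.isspace c := by
      intro x hx; simpa using List.mem_takeWhile_imp hx
    by_cases hc : PySem.Chars.isspace c = true
    · have hrep : (t.takeWhile (fun x => PySem.Chars.isspace x == PySem.Chars.isspace c)).map toSpace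
          = List.replicate (t.takeWhile (fun x => PySem.Chars.isspace x == PySem.Chars.isspace c)).length ' ' := by
        apply List.eq_replicate_iff.2
        refine ⟨by simp, ?_⟩
        intro b hb
        rcases List.mem_map.1 hb with ⟨x, hx, hbx⟩
        have hxs := hmem x hx
        rw [hc] at hxs
        rw [← hbx]; simp [toSpace, hxs]
      have hps : partIsSpace (c :: t.takeWhile (fun x => PySem.Chars.isspace x == PySem.Chars.isspace c)) = true := by
        simp [partIsSpace, hc]
      have htc : toSpace c = ' ' := by simp [toSpace, hc]
      rw [List.map_cons, List.flatten_cons, hps, if_pos rfl, ih]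
      conv_rhs => rw [← hsplit]
      rw [List.map_cons, List.map_append, htc, hrep]
      simp [List.replicate_succ]
    · have hcb : PySem.Chars.isspace c = false := Bool.eq_false_iff.mpr hc
      have hid : (t.takeWhile (fun x => PySem.Chars.isspace x == PySem.Chars.isspace c)).map toSpace
          = t.takeWhile (fun x => PySem.Chars.isspace x == PySem.Chars.isspace c) := by
        rw [List.map_congr_left (g := id) ?_, List.map_id]
        intro x hx
        have hxs := hmem x hx
        rw [hcb] at hxs
        simp [toSpace, hxs]
      have hps : partIsSpace (c :: t.takeWhile (fun x => PySem.Chars.isspace x == PySem.Chars.isspace c)) = false := by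
        simp [partIsSpace, hcb]
      have htc : toSpace c = c := by simp [toSpace, hcb]
      rw [List.map_cons, List.flatten_cons, hps]
      simp only [Bool.false_eq_true, if_false]
      rw [ih]
      conv_rhs => rw [← hsplit]
      rw [List.map_cons, List.map_append, htc, hid]
      simp

-- B's username assembly over the run list is the per-character non-space filter
theorem fmt_parts_user (l : List Char) :
    ((pvParts l).filter (fun p => !partIsSpace p)).flatten
      = l.filter (fun c => !PySem.Chars.isspace c) := by
  induction l using pvParts.induct with
  | case1 => simp [pvParts]
  | case2 c t ih =>
    rw [pvParts]
    have hsplit := List.takeWhile_append_dropWhile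
      (p := fun x => PySem.Chars.isspace x == PySem.Chars.isspace c) (l := t)
    have hmem : ∀ x ∈ t.takeWhile (fun x => PySem.Chars.isspace x == PySem.Chars.isspace c),
        PySem.Chars.isspace x = PySem.Chars.isspace c := by
      intro x hx; simpa using List.mem_takeWhile_imp hx
    by_cases hc : PySem.Chars.isspace c = true
    · have hft : (t.takeWhile (fun x => PySem.Chars.isspace x == PySem.Chars.isspace c)).filter
          (fun x => !PySem.Chars.isspace x) = [] := by
        apply List.filter_eq_nil_iff.2
        intro x hx
        have hxs := hmem x hx
        rw [hc] at hxs
        simp [hxs]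
      have hps : (!partIsSpace (c :: t.takeWhile (fun x => PySem.Chars.isspace x == PySem.Chars.isspace c))) = false := by
        simp [partIsSpace, hc]
      have hnc : (!PySem.Chars.isspace c) = false := by rw [hc]; rfl
      rw [List.filter_cons, hps]
      simp only [Bool.false_eq_true, if_false]
      rw [ih]
      conv_rhs => rw [← hsplit]
      rw [List.filter_cons, hnc]
      simp only [Bool.false_eq_true, if_false]
      rw [List.filter_append, hft, List.nil_append]
    · have hcb : PySem.Chars.isspace c = false := Bool.eq_false_iff.mpr hc
      have hfs : (t.takeWhile (fun x => PySem.Chars.isspace x == PySem.Chars.isspace c)).filter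
          (fun x => !PySem.Chars.isspace x) = t.takeWhile (fun x => PySem.Chars.isspace x == PySem.Chars.isspace c) := by
        apply List.filter_eq_self.2
        intro x hx
        have hxs := hmem x hx
        rw [hcb] at hxs
        simp [hxs]
      have hps : (!partIsSpace (c :: t.takeWhile (fun x => PySem.Chars.isspace x == PySem.Chars.isspace c))) = true := by
        simp [partIsSpace, hcb]
      have hnc : (!PySem.Chars.isspace c) = true := by rw [hcb]; rfl
      rw [List.filter_cons, hps, if_pos rfl, List.flatten_cons, ih]
      conv_rhs => rw [← hsplit]
      rw [List.filter_cons, hnc, if_pos rfl, List.filter_append, hfs]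
      simp

-- ===== VERDICT (by name: the statement is the Claim_ definition above) =====
theorem format_user_name_spec : Claim_equal_format_user_name := by
  intro name _
  unfold Spec_format_user_name format_user_name format_user_name_alt
  simp only [PySem.Str.toList_strip]
  rw [fmt_parts_en, fmt_parts_user]
  cases hs : PySem.Chars.strip name.toList with
  | nil => simp [PySem.List.enumerate_nil, PySem.Chars.lower]
  | cons c t =>
    have hc : PySem.Chars.isspace c = false := fmt_strip_head _ _ _ hs
    rw [PySem.List.enumerate_cons]
    simp only [List.foldl_cons, fmtStep, beq_self_eq_true, if_pos]
    rw [fmt_loopA t (0+1) _ _ (by norm_num)]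
    have htc : toSpace c = c := by simp [toSpace, hc]
    simp [PySem.Chars.lower, hc, htc]
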